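-- pv_equiv track=rewrite | github.com/lamm-mit/scienceclaw | autonomous/deep_investigation.py | _is_irrelevant
-- ===== SOURCE A (Python) =====
-- def _is_irrelevant(query: str, items: list) -> bool:
--     """Returns True if no item contains any token from the query string."""
--     tokens = {t.lower() for t in query.split() if len(t) > 3}
--     if not tokens:
--         return False
--     for item in items:
--         text = " ".join(str(v) for v in item.values()).lower()
--         if any(tok in text for tok in tokens):
--             return False
--     return True
-- ===== SOURCE B (Python) =====
-- def _is_irrelevant(query: str, items: list) -> bool:
--     """Returns True if no item contains any token from the query string."""
--     tokens = {t.lower() for t in query.split() if len(t) > 3}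
--     if not tokens:
--         return False
--     lengths = {len(t) for t in tokens}
--     grams = set()
--     for item in items:
--         text = " ".join(str(v) for v in item.values()).lower()
--         for L in lengths:
--             for i in range(len(text) - L + 1):
--                 grams.add(text[i : i + L])
--     return not (tokens & grams)
-- ===== Notes on version B (the rewrite author's own statement) =====
-- stated objective: alternative
-- what changed: Replaces the per-item per-token substring ('in') scan by an n-gram index: one pass collects every substring of each item text whose length matches a token length into a set, and the answer is the emptiness of the set intersection tokens & grams.
import Mathlib
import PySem

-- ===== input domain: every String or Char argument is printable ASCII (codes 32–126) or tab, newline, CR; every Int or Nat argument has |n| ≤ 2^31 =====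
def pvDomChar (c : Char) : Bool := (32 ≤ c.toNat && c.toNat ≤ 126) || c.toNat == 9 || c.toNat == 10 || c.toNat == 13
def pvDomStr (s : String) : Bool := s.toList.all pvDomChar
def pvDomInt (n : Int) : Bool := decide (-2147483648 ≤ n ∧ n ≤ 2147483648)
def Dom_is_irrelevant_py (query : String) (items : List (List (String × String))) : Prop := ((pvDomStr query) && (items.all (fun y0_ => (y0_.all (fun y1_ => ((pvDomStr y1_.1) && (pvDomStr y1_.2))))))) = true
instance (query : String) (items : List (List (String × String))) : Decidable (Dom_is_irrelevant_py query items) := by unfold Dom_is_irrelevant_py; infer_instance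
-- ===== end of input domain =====

-- B replaces A's per-item per-token substring scan by an n-gram index: it collects every
-- substring of each item text whose length equals some token's length into a set and
-- intersects that set with the token set; objective: alternative (not claimed faster).

-- ===== PORT A =====
-- shared by both Pythons line for line: the token set and the per-item text
def pyTokens (query : String) : List String :=
  PySem.Set.ofList
    (((PySem.Str.split₀ query).filter (fun t => decide ((3 : Int) < PySem.Str.len t))).map PySem.Str.lower)

def itemText (item : List (String × String)) : String :=
  PySem.Str.lower (PySem.Str.join " " (PySem.Dict.mk item).values)

-- A's for-loop over items with early return
def aLoop (tokens : List String) : List (List (String × String)) → Bool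
  | [] => true
  | item :: rest =>
      let text := itemText item
      if tokens.any (fun tok => PySem.Str.isIn tok text) then false
      else aLoop tokens rest

def is_irrelevant_py (query : String) (items : List (List (String × String))) : Bool :=
  let tokens := pyTokens query
  if tokens.isEmpty then false
  else aLoop tokens items

-- ===== PORT B =====
def is_irrelevant_py_alt (query : String) (items : List (List (String × String))) : Bool :=
  let tokens := pyTokens query
  if tokens.isEmpty then false
  else
    let lengths : PySem.Set Int := PySem.Set.ofList (tokens.map PySem.Str.len)
    let grams : PySem.Set String :=
      items.foldl (fun g item =>
        let text := itemText item
        lengths.foldl (fun g L =>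
          (PySem.List.pyRange 0 (PySem.Str.len text - L + 1)).foldl (fun g i =>
            PySem.Set.add g (PySem.Str.slice text (some i) (some (i + L)))) g) g)
        PySem.Set.empty
    (PySem.Set.inter tokens grams).isEmpty

-- ===== PRECONDITION & SPEC =====
def Spec_is_irrelevant_py (query : String) (items : List (List (String × String))) (out : Bool) : Prop := out = is_irrelevant_py_alt query items
instance (query : String) (items : List (List (String × String))) (out : Bool) : Decidable (Spec_is_irrelevant_py query items out) := by unfold Spec_is_irrelevant_py; infer_instance

-- ===== CLAIM (what is proved, stated in full; the proofs are below) =====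
def Claim_equal_is_irrelevant_py : Prop := ∀ (query : String) (items : List (List (String × String))), Dom_is_irrelevant_py query items → Spec_is_irrelevant_py query items (is_irrelevant_py query items)

-- ===== LEMMAS AND PROOFS =====

-- membership in a set built by a fold whose step only ADDS elements characterised by P
lemma mem_foldl_step {β : Type} (P : β → Prop) (x : String)
    (step : PySem.Set String → β → PySem.Set String)
    (h : ∀ g b, x ∈ step g b ↔ x ∈ g ∨ P b) :
    ∀ (l : List β) (g : PySem.Set String),
      x ∈ l.foldl step g ↔ x ∈ g ∨ ∃ b ∈ l, P b := by
  intro l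
  induction l with
  | nil => intro g; simp
  | cons b rest ih =>
      intro g
      rw [List.foldl_cons, ih, h]
      simp only [List.mem_cons]
      constructor
      · rintro ((hg | hb) | ⟨c, hc, hp⟩)
        · exact Or.inl hg
        · exact Or.inr ⟨b, Or.inl rfl, hb⟩
        · exact Or.inr ⟨c, Or.inr hc, hp⟩
      · rintro (hg | ⟨c, (rfl | hc), hp⟩)
        · exact Or.inl (Or.inl hg)
        · exact Or.inl (Or.inr hp)
        · exact Or.inr ⟨c, hc, hp⟩

-- the slice loop of one text at one length L: tok is produced iff tok has length L and is an infix
lemma exists_slice_iff (tok text : String) (L : Int) (hL0 : 0 ≤ L) :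
    (∃ i ∈ PySem.List.pyRange 0 (PySem.Str.len text - L + 1),
        tok = PySem.Str.slice text (some i) (some (i + L)))
      ↔ (PySem.Str.len tok = L ∧ tok.toList <:+: text.toList) := by
  constructor
  · rintro ⟨i, hi, htok⟩
    rw [PySem.List.mem_pyRange_one] at hi
    obtain ⟨hi0, hiu⟩ := hi
    -- name the Nat versions
    obtain ⟨j, rfl⟩ : ∃ j : Nat, i = (j : Int) := ⟨i.toNat, (Int.toNat_of_nonneg hi0).symm⟩
    obtain ⟨n, rfl⟩ : ∃ n : Nat, L = (n : Int) := ⟨L.toNat, (Int.toNat_of_nonneg hL0).symm⟩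
    have hlen : j + n ≤ text.toList.length := by
      rw [PySem.Str.len_eq] at hiu; omega
    have hslice : (PySem.Str.slice text (some (j : Int)) (some ((j : Int) + (n : Int)))).toList
        = List.take n (List.drop j text.toList) := by
      simp [PySem.Str.slice, PySem.List.slice_natCast_add]
    have htl : tok.toList = List.take n (List.drop j text.toList) := by
      rw [htok, hslice]
    constructor
    · rw [PySem.Str.len_eq, htl]
      simp only [List.length_take, List.length_drop]
      omega
    · rw [htl]
      exact ((List.take_prefix _ _).isInfix).trans ((List.drop_suffix _ _).isInfix)
  · rintro ⟨hlen, u, v, huv⟩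
    obtain ⟨n, hn⟩ : ∃ n : Nat, L = (n : Int) := ⟨L.toNat, (Int.toNat_of_nonneg hL0).symm⟩
    have htn : tok.toList.length = n := by
      rw [PySem.Str.len_eq, hn] at hlen; exact_mod_cast hlen
    refine ⟨(u.length : Int), ?_, ?_⟩
    · rw [PySem.List.mem_pyRange_one]
      have hl := congrArg List.length huv
      simp only [List.length_append] at hl
      rw [PySem.Str.len_eq, hn]
      constructor
      · exact Int.natCast_nonneg _
      · omega
    · apply String.toList_inj.mp
      have hslice : (PySem.Str.slice text (some (u.length : Int))
            (some ((u.length : Int) + L))).toList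
          = List.take n (List.drop u.length text.toList) := by
        rw [hn]
        simp [PySem.Str.slice, PySem.List.slice_natCast_add]
      rw [hslice, ← huv, List.append_assoc, List.drop_left, List.take_left' htn]

-- A's loop with early return is the negated any-over-items
lemma aLoop_eq (tokens : List String) :
    ∀ items : List (List (String × String)),
      aLoop tokens items
        = !(items.any (fun item => tokens.any (fun tok => PySem.Str.isIn tok (itemText item))))
  | [] => rfl
  | item :: rest => by
      simp only [aLoop, List.any_cons]
      rw [aLoop_eq tokens rest]
      cases tokens.any (fun tok => PySem.Str.isIn tok (itemText item)) <;> simp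

-- membership in B's gram set
lemma mem_grams (tok : String) (lengths : List Int) (items : List (List (String × String))) :
    tok ∈ items.foldl (fun g item =>
        let text := itemText item
        lengths.foldl (fun g L =>
          (PySem.List.pyRange 0 (PySem.Str.len text - L + 1)).foldl (fun g i =>
            PySem.Set.add g (PySem.Str.slice text (some i) (some (i + L)))) g) g)
        PySem.Set.empty
      ↔ ∃ item ∈ items, ∃ L ∈ lengths,
          ∃ i ∈ PySem.List.pyRange 0 (PySem.Str.len (itemText item) - L + 1),
            tok = PySem.Str.slice (itemText item) (some i) (some (i + L)) := by
  rw [mem_foldl_step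
      (P := fun item => ∃ L ∈ lengths,
          ∃ i ∈ PySem.List.pyRange 0 (PySem.Str.len (itemText item) - L + 1),
            tok = PySem.Str.slice (itemText item) (some i) (some (i + L)))
      (x := tok)]
  · simp only [PySem.Set.empty, List.not_mem_nil, false_or]
  · intro g item
    rw [mem_foldl_step
        (P := fun L => ∃ i ∈ PySem.List.pyRange 0 (PySem.Str.len (itemText item) - L + 1),
            tok = PySem.Str.slice (itemText item) (some i) (some (i + L)))
        (x := tok)]
    intro g L
    rw [mem_foldl_step
        (P := fun i => tok = PySem.Str.slice (itemText item) (some i) (some (i + L)))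
        (x := tok)]
    intro g i
    exact PySem.Set.mem_add g _ tok

-- ===== VERDICT (by name: the statement is the Claim_ definition above) =====
theorem is_irrelevant_py_spec : Claim_equal_is_irrelevant_py := by
  intro query items _
  unfold Spec_is_irrelevant_py is_irrelevant_py is_irrelevant_py_alt
  by_cases h : (pyTokens query).isEmpty
  · simp [h]
  · simp only [h, Bool.false_eq_true, if_neg, not_false_eq_true]
    rw [aLoop_eq, Bool.eq_iff_iff]
    simp only [Bool.not_eq_true', List.any_eq_false, Bool.not_eq_true, List.isEmpty_iff,
      List.eq_nil_iff_forall_not_mem]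
    constructor
    · intro hA x hx
      rw [PySem.Set.mem_inter] at hx
      obtain ⟨hxtok, hxg⟩ := hx
      rw [mem_grams] at hxg
      obtain ⟨item, hitem, L, hL, hi⟩ := hxg
      have hL0 : 0 ≤ L := by
        rw [PySem.Set.mem_ofList] at hL
        obtain ⟨t, _, rfl⟩ := List.mem_map.mp hL
        rw [PySem.Str.len_eq]
        exact Int.natCast_nonneg _
      have := (exists_slice_iff x (itemText item) L hL0).mp hi
      have hfalse := hA item hitem x hxtok
      have htrue := (PySem.Str.isIn_iff_infix x (itemText item)).mpr this.2
      rw [hfalse] at htrue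
      exact Bool.false_ne_true htrue
    · intro hB item hitem tok htok
      rw [Bool.eq_false_iff]
      intro htrue
      have hinf := (PySem.Str.isIn_iff_infix tok (itemText item)).mp htrue
      apply hB tok
      rw [PySem.Set.mem_inter]
      refine ⟨htok, ?_⟩
      rw [mem_grams]
      refine ⟨item, hitem, PySem.Str.len tok, ?_, ?_⟩
      · rw [PySem.Set.mem_ofList]
        exact List.mem_map.mpr ⟨tok, htok, rfl⟩
      · exact (exists_slice_iff tok (itemText item) (PySem.Str.len tok)
            (by rw [PySem.Str.len_eq]; exact Int.natCast_nonneg _)).mpr ⟨rfl, hinf⟩
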